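-- pv_equiv track=rewrite | github.com/guna29/hireagent | src/hireagent/scoring/tailor.py | _trim_bullets_to_budget
-- ===== SOURCE A (Python) =====
-- def _trim_bullets_to_budget(bullets: list[str], max_total_words: int, min_words: int = 6) -> tuple[list[str], bool]:
--     """Trim bullets deterministically until total word budget fits."""
--     word_lists = [b.split() for b in bullets]
--     total = sum(len(words) for words in word_lists)
--     if total <= max_total_words:
--         return [" ".join(words) for words in word_lists], True
--
--     while total > max_total_words:
--         # Find the longest bullet we can still trim.
--         idx = max(range(len(word_lists)), key=lambda i: len(word_lists[i]))
--         if len(word_lists[idx]) <= min_words: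
--             break
--         word_lists[idx].pop()
--         total -= 1
--
--     trimmed = [" ".join(words) for words in word_lists]
--     return trimmed, total <= max_total_words
-- ===== SOURCE B (Python) =====
-- def _trim_bullets_to_budget(bullets: list[str], max_total_words: int, min_words: int = 6) -> tuple[list[str], bool]:
--     """Water-filling: compute the final per-bullet word caps directly (no pop-one-word loop)."""
--     word_lists = [b.split() for b in bullets]
--     lens = [len(w) for w in word_lists]
--     total = sum(lens)
--     if total <= max_total_words:
--         return [" ".join(w) for w in word_lists], True
--
--     def water_sum(level):
--         return sum(l if l < level else level for l in lens)
--
--     if water_sum(min_words) > max_total_words: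
--         # even trimming every bullet down to min_words words cannot fit the budget
--         return [" ".join(w[:min(l, min_words)]) for w, l in zip(word_lists, lens)], False
--
--     # largest level with water_sum(level) <= budget, by binary search
--     lo, hi = min_words, max(lens)
--     while hi - lo > 1:
--         mid = (lo + hi) // 2
--         if water_sum(mid) <= max_total_words:
--             lo = mid
--         else:
--             hi = mid
--     level = lo
--     r = water_sum(level + 1) - max_total_words
--     out = []
--     for w, l in zip(word_lists, lens):
--         if r > 0 and l > level:
--             out.append(" ".join(w[:level]))
--             r -= 1
--         else:
--             out.append(" ".join(w[:min(l, level + 1)]))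
--     return out, True
-- ===== Notes on version B (the rewrite author's own statement) =====
-- stated objective: alternative
-- what changed: A pops one word at a time, rescanning every bullet for the current longest before each single pop; B computes the final water level directly (binary search on the level with a linear water-sum per probe) and emits each bullet's final word cap in one output pass.
import Mathlib
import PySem

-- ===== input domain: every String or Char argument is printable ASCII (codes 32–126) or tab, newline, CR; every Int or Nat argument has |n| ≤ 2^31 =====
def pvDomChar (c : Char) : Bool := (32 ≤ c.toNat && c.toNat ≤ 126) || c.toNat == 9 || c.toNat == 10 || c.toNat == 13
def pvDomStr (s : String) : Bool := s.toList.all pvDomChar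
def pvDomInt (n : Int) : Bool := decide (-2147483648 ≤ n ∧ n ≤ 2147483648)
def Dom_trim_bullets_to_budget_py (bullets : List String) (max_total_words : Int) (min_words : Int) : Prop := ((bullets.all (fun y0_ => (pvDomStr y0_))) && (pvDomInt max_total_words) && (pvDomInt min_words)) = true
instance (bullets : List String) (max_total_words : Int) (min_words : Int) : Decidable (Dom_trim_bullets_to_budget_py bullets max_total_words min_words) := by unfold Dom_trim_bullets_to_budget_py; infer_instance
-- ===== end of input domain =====

-- B replaces A's pop-one-word-at-a-time loop (which rescans all bullets for the longest before
-- every single pop) by a direct water-filling computation of the final per-bullet word caps;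
-- objective: alternative (a genuinely different algorithm for the same trimming result).

-- ===== PORT A =====
-- Python: max(range(len(ws)), key=lambda i: len(ws[i])) — left-to-right scan, first index wins ties
def pvArgmax (ws : List (List String)) : Nat :=
  (List.range ws.length).foldl
    (fun best i => if (ws.getD best []).length < (ws.getD i []).length then i else best) 0

-- the while loop; fuel = total - max_total_words bounds the number of pops (each pop lowers total by 1)
def pvTrimLoop (max_total_words min_words : Int) :
    Nat → List (List String) → Int → List (List String) × Int
  | 0, ws, total => (ws, total)
  | fuel+1, ws, total =>
    if total ≤ max_total_words then (ws, total)
    else if ((ws.getD (pvArgmax ws) []).length : Int) ≤ min_words then (ws, total)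
    else pvTrimLoop max_total_words min_words fuel
      (ws.set (pvArgmax ws) (ws.getD (pvArgmax ws) []).dropLast) (total - 1)

def trim_bullets_to_budget_py (bullets : List String) (max_total_words : Int) (min_words : Int) : List String × Bool :=
  let word_lists := bullets.map PySem.Str.split₀
  let total : Int := (word_lists.map (fun w => (w.length : Int))).sum
  if total ≤ max_total_words then (word_lists.map (fun w => PySem.Str.join " " w), true)
  else
    let res := pvTrimLoop max_total_words min_words (total - max_total_words).toNat word_lists total
    (res.1.map (fun w => PySem.Str.join " " w), decide (res.2 ≤ max_total_words))

-- ===== PORT B =====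
def pvLens (ws : List (List String)) : List Int := ws.map (fun w => (w.length : Int))

def pvWaterSum (lens : List Int) (level : Int) : Int :=
  (lens.map (fun l => if l < level then l else level)).sum

-- the binary-search while loop of Source B; fuel = hi - lo bounds the number of halvings
def pvBSearch (lens : List Int) (max_total_words : Int) : Nat → Int → Int → Int
  | 0, lo, _ => lo
  | fuel+1, lo, hi =>
    if 1 < hi - lo then
      if pvWaterSum lens (PySem.Int.floordiv (lo + hi) 2) ≤ max_total_words then
        pvBSearch lens max_total_words fuel (PySem.Int.floordiv (lo + hi) 2) hi
      else pvBSearch lens max_total_words fuel lo (PySem.Int.floordiv (lo + hi) 2)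
    else lo

-- the final output loop of Source B, threading the remainder counter r
def pvAssign (level : Int) : Int → List (List String × Int) → List String
  | _, [] => []
  | r, (w, l) :: rest =>
    if 0 < r ∧ level < l then
      PySem.Str.join " " (PySem.List.slice w none (some level)) :: pvAssign level (r - 1) rest
    else
      PySem.Str.join " " (PySem.List.slice w none (some (min l (level + 1)))) :: pvAssign level r rest

def trim_bullets_to_budget_py_alt (bullets : List String) (max_total_words : Int) (min_words : Int) : List String × Bool :=
  let word_lists := bullets.map PySem.Str.split₀
  let lens := pvLens word_lists
  let total := lens.sum
  if total ≤ max_total_words then (word_lists.map (fun w => PySem.Str.join " " w), true)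
  else if max_total_words < pvWaterSum lens min_words then
    ((word_lists.zip lens).map
      (fun p => PySem.Str.join " " (PySem.List.slice p.1 none (some (min p.2 min_words)))), false)
  else
    -- max(lens); Python's max raises on an empty list, which Pre_ excludes here
    let hi := (PySem.List.max? lens (fun x => x)).getD 0
    let level := pvBSearch lens max_total_words (hi - min_words).toNat min_words hi
    let r := pvWaterSum lens (level + 1) - max_total_words
    (pvAssign level r (word_lists.zip lens), true)

-- ===== PRECONDITION & SPEC =====
-- Pre_ excludes exactly the inputs on which Python A raises: with max_total_words < 0 A raises
-- ValueError (max of an empty range) when bullets == [], and IndexError (pop from an empty list)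
-- when min_words < 0 (every word gets popped, yet the budget is still exceeded).
def Pre_trim_bullets_to_budget_py (bullets : List String) (max_total_words : Int) (min_words : Int) : Prop :=
  max_total_words < 0 → (0 ≤ min_words ∧ bullets ≠ [])
instance (bullets : List String) (max_total_words : Int) (min_words : Int) : Decidable (Pre_trim_bullets_to_budget_py bullets max_total_words min_words) := by unfold Pre_trim_bullets_to_budget_py; infer_instance
def pvWitness_trim_bullets_to_budget_py : List String × Int × Int := (["a b c"], 1, 1)

def Spec_trim_bullets_to_budget_py (bullets : List String) (max_total_words : Int) (min_words : Int) (out : List String × Bool) : Prop := out = trim_bullets_to_budget_py_alt bullets max_total_words min_words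
instance (bullets : List String) (max_total_words : Int) (min_words : Int) (out : List String × Bool) : Decidable (Spec_trim_bullets_to_budget_py bullets max_total_words min_words out) := by unfold Spec_trim_bullets_to_budget_py; infer_instance

-- ===== CLAIM (what is proved, stated in full; the proofs are below) =====
def Claim_equal_trim_bullets_to_budget_py : Prop := ∀ (bullets : List String) (max_total_words : Int) (min_words : Int), Dom_trim_bullets_to_budget_py bullets max_total_words min_words → Pre_trim_bullets_to_budget_py bullets max_total_words min_words → Spec_trim_bullets_to_budget_py bullets max_total_words min_words (trim_bullets_to_budget_py bullets max_total_words min_words)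

-- ===== LEMMAS AND PROOFS =====

-- B's core on word lists (the body of trim_bullets_to_budget_py_alt after splitting)
def pvLevel (maxw minw : Int) (ws : List (List String)) : Int :=
  pvBSearch (pvLens ws) maxw
    ((((PySem.List.max? (pvLens ws) (fun x => x)).getD 0) - minw).toNat) minw
    ((PySem.List.max? (pvLens ws) (fun x => x)).getD 0)

def pvBCore (maxw minw : Int) (ws : List (List String)) : List String × Bool :=
  if (pvLens ws).sum ≤ maxw then (ws.map (fun w => PySem.Str.join " " w), true)
  else if maxw < pvWaterSum (pvLens ws) minw then
    ((ws.zip (pvLens ws)).map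
      (fun p => PySem.Str.join " " (PySem.List.slice p.1 none (some (min p.2 minw)))), false)
  else
    (pvAssign (pvLevel maxw minw ws)
      (pvWaterSum (pvLens ws) (pvLevel maxw minw ws + 1) - maxw) (ws.zip (pvLens ws)), true)

theorem pvAlt_eq_bcore (bullets : List String) (maxw minw : Int) :
    trim_bullets_to_budget_py_alt bullets maxw minw = pvBCore maxw minw (bullets.map PySem.Str.split₀) := rfl

-- water-sum basics
theorem pvWS_append (a b : List Int) (L : Int) :
    pvWaterSum (a ++ b) L = pvWaterSum a L + pvWaterSum b L := by
  simp [pvWaterSum]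

theorem pvWS_cons (l : Int) (t : List Int) (L : Int) :
    pvWaterSum (l :: t) L = (if l < L then l else L) + pvWaterSum t L := by
  simp [pvWaterSum]

theorem pvWS_mono (lens : List Int) {L1 L2 : Int} (h : L1 ≤ L2) :
    pvWaterSum lens L1 ≤ pvWaterSum lens L2 := by
  induction lens with
  | nil => simp [pvWaterSum]
  | cons l t ih =>
    rw [pvWS_cons, pvWS_cons]
    have : (if l < L1 then l else L1) ≤ (if l < L2 then l else L2) := by
      split_ifs <;> omega
    omega

theorem pvWS_le_sum (lens : List Int) (L : Int) : pvWaterSum lens L ≤ lens.sum := by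
  induction lens with
  | nil => simp [pvWaterSum]
  | cons l t ih =>
    rw [pvWS_cons, List.sum_cons]
    have : (if l < L then l else L) ≤ l := by split_ifs <;> omega
    omega

theorem pvWS_eq_sum_of_le (lens : List Int) (L : Int) (h : ∀ l ∈ lens, l ≤ L) :
    pvWaterSum lens L = lens.sum := by
  induction lens with
  | nil => simp [pvWaterSum]
  | cons l t ih =>
    rw [pvWS_cons, List.sum_cons]
    have h1 : l ≤ L := h l (by simp)
    have h2 := ih (fun x hx => h x (by simp [hx]))
    have : (if l < L then l else L) = l := by split_ifs <;> omega
    omega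

theorem pvWS_nonneg (lens : List Int) (L : Int) (hL : 0 ≤ L) (h : ∀ l ∈ lens, 0 ≤ l) :
    0 ≤ pvWaterSum lens L := by
  induction lens with
  | nil => simp [pvWaterSum]
  | cons l t ih =>
    rw [pvWS_cons]
    have h1 : 0 ≤ l := h l (by simp)
    have h2 := ih (fun x hx => h x (by simp [hx]))
    have : 0 ≤ (if l < L then l else L) := by split_ifs <;> omega
    omega

theorem pvWS_of_nonpos (lens : List Int) (L : Int) (hL : L ≤ 0) (h : ∀ l ∈ lens, 0 ≤ l) :
    pvWaterSum lens L = lens.length * L := by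
  induction lens with
  | nil => simp [pvWaterSum]
  | cons l t ih =>
    rw [pvWS_cons]
    have h1 : 0 ≤ l := h l (by simp)
    have h2 := ih (fun x hx => h x (by simp [hx]))
    have : (if l < L then l else L) = L := by split_ifs <;> omega
    rw [this, h2]
    simp [List.length_cons]
    ring

theorem pvLens_nonneg (ws : List (List String)) : ∀ l ∈ pvLens ws, 0 ≤ l := by
  intro l hl
  simp [pvLens, List.mem_map] at hl
  obtain ⟨w, _, rfl⟩ := hl
  positivity

-- binary search: returns the unique level with S(level) ≤ maxw < S(level+1)
theorem pvBSearch_spec (lens : List Int) (maxw : Int) :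
    ∀ (fuel : Nat) (lo hi : Int), pvWaterSum lens lo ≤ maxw → maxw < pvWaterSum lens hi →
    lo < hi → (hi - lo).toNat ≤ fuel →
    pvWaterSum lens (pvBSearch lens maxw fuel lo hi) ≤ maxw ∧
    maxw < pvWaterSum lens (pvBSearch lens maxw fuel lo hi + 1) ∧
    lo ≤ pvBSearch lens maxw fuel lo hi ∧ pvBSearch lens maxw fuel lo hi < hi := by
  intro fuel
  induction fuel with
  | zero => intro lo hi _ _ hlt hf; omega
  | succ n ih =>
    intro lo hi hlo hhi hlt hf
    rw [pvBSearch]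
    have hmid : PySem.Int.floordiv (lo + hi) 2 = (lo + hi) / 2 :=
      PySem.Int.floordiv_eq_ediv_of_pos (by norm_num)
    rw [hmid]
    split_ifs with hgap htest
    · have hb : lo < (lo + hi) / 2 ∧ (lo + hi) / 2 < hi := by omega
      have := ih ((lo + hi) / 2) hi htest hhi hb.2 (by omega)
      exact ⟨this.1, this.2.1, by omega, this.2.2.2⟩
    · have hb : lo < (lo + hi) / 2 ∧ (lo + hi) / 2 < hi := by omega
      have := ih lo ((lo + hi) / 2) hlo (by omega) hb.1 (by omega)
      exact ⟨this.1, this.2.1, this.2.2.1, by omega⟩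
    · have : hi = lo + 1 := by omega
      subst this
      exact ⟨hlo, by simpa using hhi, le_refl _, by omega⟩

theorem pvLevel_unique (lens : List Int) (maxw L L' : Int)
    (h1 : pvWaterSum lens L ≤ maxw) (h2 : maxw < pvWaterSum lens (L + 1))
    (h3 : pvWaterSum lens L' ≤ maxw) (h4 : maxw < pvWaterSum lens (L' + 1)) : L = L' := by
  rcases lt_trichotomy L L' with h | h | h
  · have := pvWS_mono lens (show L + 1 ≤ L' by omega)
    omega
  · exact h
  · have := pvWS_mono lens (show L' + 1 ≤ L by omega)
    omega

-- max(lens): an element that bounds all elements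
theorem pvMax_spec (lens : List Int) (hne : lens ≠ []) :
    (PySem.List.max? lens (fun x => x)).getD 0 ∈ lens ∧
    ∀ y ∈ lens, y ≤ (PySem.List.max? lens (fun x => x)).getD 0 := by
  obtain ⟨m, hm⟩ : ∃ m, PySem.List.max? lens (fun x => x) = some m := by
    cases h : PySem.List.max? lens (fun x => x) with
    | none => exact absurd ((PySem.List.max?_eq_none_iff lens (fun x => x)).mp h) hne
    | some m => exact ⟨m, rfl⟩
  rw [hm]
  exact ⟨PySem.List.max?_mem hm, fun y hy => PySem.List.max?_isMax hm y hy⟩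

-- argmax characterization: first index of maximal length
theorem pvArgmax_aux (ws : List (List String)) :
    ∀ n : Nat, 0 < n →
    (List.range n).foldl
        (fun best i => if (ws.getD best []).length < (ws.getD i []).length then i else best) 0 < n ∧
    (∀ j < n, (ws.getD j []).length ≤
      (ws.getD ((List.range n).foldl
        (fun best i => if (ws.getD best []).length < (ws.getD i []).length then i else best) 0) []).length) ∧
    (∀ j < (List.range n).foldl
        (fun best i => if (ws.getD best []).length < (ws.getD i []).length then i else best) 0,
      (ws.getD j []).length <
      (ws.getD ((List.range n).foldl
        (fun best i => if (ws.getD best []).length < (ws.getD i []).length then i else best) 0) []).length) := by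
  intro n
  induction n with
  | zero => omega
  | succ n ih =>
    intro _
    rw [List.range_succ, List.foldl_append]
    rcases Nat.eq_zero_or_pos n with h0 | hpos
    · subst h0
      simp only [List.range_zero, List.foldl_nil, List.foldl_cons]
      split_ifs with h
      · exact ⟨by omega, fun j hj => by interval_cases j <;> omega, fun j hj => by omega⟩
      · exact ⟨by omega, fun j hj => by interval_cases j <;> omega, fun j hj => by omega⟩
    · obtain ⟨ihb, ihmax, ihfirst⟩ := ih hpos
      simp only [List.foldl_cons, List.foldl_nil]
      split_ifs with h
      · refine ⟨by omega, fun j hj => ?_, fun j hj => ?_⟩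
        · rcases Nat.lt_or_ge j n with hj' | hj'
          · exact le_of_lt (lt_of_le_of_lt (ihmax j hj') h)
          · have : j = n := by omega
            subst this; exact le_refl _
        · exact lt_of_le_of_lt (ihmax j (by omega)) h
      · exact ⟨by omega, fun j hj => by
          rcases Nat.lt_or_ge j n with hj' | hj'
          · exact ihmax j hj'
          · have : j = n := by omega
            subst this; omega, ihfirst⟩

theorem pvArgmax_spec (ws : List (List String)) (hne : ws ≠ []) :
    pvArgmax ws < ws.length ∧
    (∀ j < ws.length, (ws.getD j []).length ≤ (ws.getD (pvArgmax ws) []).length) ∧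
    (∀ j < pvArgmax ws, (ws.getD j []).length < (ws.getD (pvArgmax ws) []).length) := by
  have hlen : 0 < ws.length := List.length_pos_iff.mpr hne
  exact pvArgmax_aux ws ws.length hlen

-- r-counter after a prefix
def pvRAfter (level : Int) (r : Int) (xs : List (List String × Int)) : Int :=
  xs.foldl (fun r p => if 0 < r ∧ level < p.2 then r - 1 else r) r

theorem pvAssign_append (level : Int) (xs ys : List (List String × Int)) :
    ∀ r, pvAssign level r (xs ++ ys) =
      pvAssign level r xs ++ pvAssign level (pvRAfter level r xs) ys := by
  induction xs with
  | nil => intro r; simp [pvAssign, pvRAfter]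
  | cons p t ih =>
    intro r
    obtain ⟨w, l⟩ := p
    simp only [List.cons_append, pvAssign, pvRAfter, List.foldl_cons]
    split_ifs with h <;> simp [ih, pvRAfter]

-- a prefix whose lengths are all ≤ level produces full bullets and leaves r unchanged
theorem pvAssign_low (level : Int) (xs : List (List String × Int))
    (h : ∀ p ∈ xs, p.2 ≤ level) :
    (∀ r, pvAssign level r xs =
        xs.map (fun p => PySem.Str.join " " (PySem.List.slice p.1 none (some (min p.2 (level + 1)))))) ∧
    (∀ r, pvRAfter level r xs = r) := by
  induction xs with
  | nil => simp [pvAssign, pvRAfter]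
  | cons p t ih =>
    obtain ⟨w, l⟩ := p
    have hl : l ≤ level := h (w, l) (by simp)
    have iht := ih (fun q hq => h q (by simp [hq]))
    constructor
    · intro r
      rw [pvAssign]
      split_ifs with hc
      · omega
      · simp [iht.1 r]
    · intro r
      simp only [pvRAfter, List.foldl_cons]
      have : ¬(0 < r ∧ level < l) := by omega
      rw [if_neg this]
      exact iht.2 r

-- a full slice: cap = length
theorem pvSlice_full (w : List String) (c : Int) (hc : c = (w.length : Int)) :
    PySem.List.slice w none (some c) = w := by
  subst hc
  rw [PySem.List.slice_to_natCast w w.length]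
  simp

-- slice of dropLast = slice of the original when the cap is below the last index
theorem pvSlice_dropLast (w : List String) (c : Int) (h0 : 0 ≤ c)
    (h : c ≤ (w.length : Int) - 1) :
    PySem.List.slice w.dropLast none (some c) = PySem.List.slice w none (some c) := by
  rw [PySem.List.slice_to _ h0, PySem.List.slice_to _ h0, List.dropLast_eq_take, List.take_take]
  congr 1
  omega

-- dropLast as a slice to length-1
theorem pvSlice_pred (w : List String) (c : Int) (h1 : 1 ≤ (w.length : Int))
    (hc : c = (w.length : Int) - 1) :
    PySem.List.slice w none (some c) = w.dropLast := by
  rw [PySem.List.slice_to _ (by omega), List.dropLast_eq_take]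
  congr 1
  omega

theorem pvLens_append (a b : List (List String)) : pvLens (a ++ b) = pvLens a ++ pvLens b := by
  simp [pvLens]

theorem pvLens_cons (w : List String) (t : List (List String)) :
    pvLens (w :: t) = (w.length : Int) :: pvLens t := by
  simp [pvLens]

theorem pvZip_map {α : Type} (ws : List (List String)) (f : List String × Int → α) :
    (ws.zip (pvLens ws)).map f = ws.map (fun w => f (w, (w.length : Int))) := by
  induction ws with
  | nil => simp [pvLens]
  | cons w t ih => simp [pvLens] at ih ⊢; exact ih

theorem pvZipMap_full (xs : List (List String)) (c : Int)
    (hc : ∀ w ∈ xs, (w.length : Int) ≤ c) :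
    (xs.zip (pvLens xs)).map
        (fun p => PySem.Str.join " " (PySem.List.slice p.1 none (some (min p.2 c)))) =
      xs.map (fun w => PySem.Str.join " " w) := by
  rw [pvZip_map]
  apply List.map_congr_left
  intro w hw
  congr 1
  exact pvSlice_full _ _ (min_eq_left (hc w hw))

theorem pvZip_snd_le (xs : List (List String)) (c : Int)
    (hc : ∀ w ∈ xs, (w.length : Int) ≤ c) :
    ∀ p ∈ xs.zip (pvLens xs), p.2 ≤ c := by
  intro p hp
  have := (List.of_mem_zip hp).2
  simp only [pvLens, List.mem_map] at this
  obtain ⟨w, hw, h⟩ := this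
  rw [← h]
  exact hc w hw

theorem pvLensMem_le (ws : List (List String)) (c : Int)
    (h : ∀ w ∈ ws, (w.length : Int) ≤ c) : ∀ l ∈ pvLens ws, l ≤ c := by
  intro l hl
  simp only [pvLens, List.mem_map] at hl
  obtain ⟨w, hw, rfl⟩ := hl
  exact h w hw

-- the break case: every bullet already at/below min_words, budget still exceeded
theorem pvBCore_break (maxw minw : Int) (ws : List (List String))
    (htot : maxw < (pvLens ws).sum)
    (hall : ∀ u ∈ ws, (u.length : Int) ≤ minw) :
    pvBCore maxw minw ws = (ws.map (fun w => PySem.Str.join " " w), false) := by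
  have hS : pvWaterSum (pvLens ws) minw = (pvLens ws).sum :=
    pvWS_eq_sum_of_le _ _ (pvLensMem_le ws minw hall)
  unfold pvBCore
  rw [if_neg (by omega), if_pos (by omega)]
  exact congrArg (fun x => (x, false)) (pvZipMap_full ws minw hall)

-- r never revives once nonpositive
theorem pvAssign_nonpos (L : Int) (xs : List (List String × Int)) :
    ∀ r ≤ 0, pvAssign L r xs =
      xs.map (fun p => PySem.Str.join " " (PySem.List.slice p.1 none (some (min p.2 (L + 1))))) := by
  induction xs with
  | nil => intro r _; simp [pvAssign]
  | cons p t ih =>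
    intro r hr
    obtain ⟨w, l⟩ := p
    rw [pvAssign, if_neg (by omega)]
    simp [ih r hr]

-- with the first longest bullet at the head of the remaining pairs and r ≥ 1,
-- pvAssign trims exactly that bullet's last word and decrements r
theorem pvZip_decomp' (pre post : List (List String)) (w : List String) (x : Int) :
    (pre ++ w :: post).zip (pvLens pre ++ x :: pvLens post) =
      pre.zip (pvLens pre) ++ (w, x) :: post.zip (pvLens post) := by
  rw [List.zip_append (by simp [pvLens])]
  simp

theorem pvAssign_pop (L : Int) (pre post : List (List String)) (w : List String) (x : Int)
    (hM : (w.length : Int) = x) (hx : x = L + 1) (hL : 0 ≤ L)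
    (hpre : ∀ u ∈ pre, (u.length : Int) ≤ L) (r : Int) (hr : 1 ≤ r) :
    pvAssign L r (pre.zip (pvLens pre) ++ (w, x) :: post.zip (pvLens post)) =
      pre.map (fun u => PySem.Str.join " " u) ++
        PySem.Str.join " " w.dropLast :: pvAssign L (r - 1) (post.zip (pvLens post)) := by
  rw [pvAssign_append]
  have hlow := pvAssign_low L (pre.zip (pvLens pre)) (pvZip_snd_le pre L hpre)
  rw [hlow.1 r, hlow.2 r]
  congr 1
  · exact pvZipMap_full pre (L + 1) (fun u hu => by have := hpre u hu; omega)
  · have hc : 0 < r ∧ L < x := ⟨by omega, by omega⟩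
    rw [pvAssign, if_pos hc]
    congr 2
    exact pvSlice_pred w L (by omega) (by omega)

-- the bsearch result in the fitting branch: the unique water level
theorem pvLevel_spec (maxw minw : Int) (ws : List (List String)) (hne : pvLens ws ≠ [])
    (hfit : pvWaterSum (pvLens ws) minw ≤ maxw)
    (htot : maxw < (pvLens ws).sum) :
    pvWaterSum (pvLens ws) (pvLevel maxw minw ws) ≤ maxw ∧
    maxw < pvWaterSum (pvLens ws) (pvLevel maxw minw ws + 1) ∧
    minw ≤ pvLevel maxw minw ws ∧
    pvLevel maxw minw ws < (PySem.List.max? (pvLens ws) (fun x => x)).getD 0 := by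
  obtain ⟨hmem, hmax⟩ := pvMax_spec (pvLens ws) hne
  have hShi : pvWaterSum (pvLens ws) ((PySem.List.max? (pvLens ws) (fun x => x)).getD 0)
      = (pvLens ws).sum := pvWS_eq_sum_of_le _ _ hmax
  have hgt : maxw < pvWaterSum (pvLens ws) ((PySem.List.max? (pvLens ws) (fun x => x)).getD 0) := by
    omega
  have hlohi : minw < (PySem.List.max? (pvLens ws) (fun x => x)).getD 0 := by
    by_contra h
    push_neg at h
    have := pvWS_mono (pvLens ws) h
    omega
  exact pvBSearch_spec (pvLens ws) maxw _ minw _ hfit hgt hlohi (le_refl _)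

-- THE STEP LEMMA: popping the last word of the first longest bullet does not change B's answer
theorem pvBCore_step (maxw minw : Int) (pre post : List (List String)) (w : List String)
    (hpre : maxw < 0 → 0 ≤ minw)
    (hlt : ∀ u ∈ pre, u.length < w.length)
    (hle : ∀ u ∈ post, u.length ≤ w.length)
    (hmw : minw < (w.length : Int))
    (htot : maxw < (pvLens (pre ++ w :: post)).sum) :
    pvBCore maxw minw (pre ++ w.dropLast :: post) = pvBCore maxw minw (pre ++ w :: post) := by
  set M : Int := (w.length : Int) with hMdef
  have hM0 : 0 ≤ M := by positivity
  have hP1 : ∀ l ∈ pvLens pre, l ≤ M - 1 := by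
    intro l hl; simp only [pvLens, List.mem_map] at hl
    obtain ⟨u, hu, rfl⟩ := hl
    have := hlt u hu; omega
  have hQ1 : ∀ l ∈ pvLens post, l ≤ M := by
    intro l hl; simp only [pvLens, List.mem_map] at hl
    obtain ⟨u, hu, rfl⟩ := hl
    have := hle u hu; omega
  have hP0 := pvLens_nonneg pre
  have hQ0 := pvLens_nonneg post
  have hLA : pvLens (pre ++ w :: post) = pvLens pre ++ M :: pvLens post := by
    rw [pvLens_append, pvLens_cons]
  have hallA : ∀ l ∈ pvLens pre ++ M :: pvLens post, l ≤ M := by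
    intro l hl
    rcases List.mem_append.mp hl with h | h
    · have := hP1 l h; omega
    · rcases List.mem_cons.mp h with h | h
      · omega
      · exact hQ1 l h
  have hallA0 : ∀ l ∈ pvLens pre ++ M :: pvLens post, 0 ≤ l := by
    rw [← hLA]; exact pvLens_nonneg _
  have h1M : 1 ≤ M := by
    by_contra hc
    have hMz : M = 0 := by omega
    have hall : ∀ l ∈ pvLens pre ++ M :: pvLens post, l ≤ 0 := by
      intro l hl; have := hallA l hl; omega
    have e1 := pvWS_eq_sum_of_le _ 0 hall
    have e2 := pvWS_of_nonpos (pvLens pre ++ M :: pvLens post) 0 (le_refl 0) hallA0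
    rw [hLA] at htot
    have := hpre (by omega)
    omega
  have hdl : ((w.dropLast.length : Nat) : Int) = M - 1 := by
    rw [List.length_dropLast]; omega
  have hLB : pvLens (pre ++ w.dropLast :: post) = pvLens pre ++ (M - 1) :: pvLens post := by
    rw [pvLens_append, pvLens_cons, hdl]
  have hallB : ∀ l ∈ pvLens pre ++ (M - 1) :: pvLens post, l ≤ M := by
    intro l hl
    rcases List.mem_append.mp hl with h | h
    · have := hP1 l h; omega
    · rcases List.mem_cons.mp h with h | h
      · omega
      · exact hQ1 l h
  have hallB0 : ∀ l ∈ pvLens pre ++ (M - 1) :: pvLens post, 0 ≤ l := by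
    rw [← hLB]; exact pvLens_nonneg _
  have hTA : (pvLens pre ++ M :: pvLens post).sum
      = (pvLens pre).sum + M + (pvLens post).sum := by
    rw [List.sum_append, List.sum_cons]; ring
  have hTB : (pvLens pre ++ (M - 1) :: pvLens post).sum
      = (pvLens pre).sum + M + (pvLens post).sum - 1 := by
    rw [List.sum_append, List.sum_cons]; ring
  rw [hLA, hTA] at htot
  have hWS : ∀ (x X : Int), pvWaterSum (pvLens pre ++ x :: pvLens post) X =
      pvWaterSum (pvLens pre) X + (if x < X then x else X) + pvWaterSum (pvLens post) X := by
    intro x X; rw [pvWS_append, pvWS_cons]; ring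
  have hSeq : ∀ X : Int, X ≤ M - 1 →
      pvWaterSum (pvLens pre ++ (M - 1) :: pvLens post) X =
      pvWaterSum (pvLens pre ++ M :: pvLens post) X := by
    intro X hX
    rw [hWS, hWS, if_neg (by omega), if_neg (by omega)]
  have hSM : pvWaterSum (pvLens pre ++ M :: pvLens post) M
      = (pvLens pre).sum + M + (pvLens post).sum := by
    rw [pvWS_eq_sum_of_le _ M hallA]; exact hTA
  have hSBM : pvWaterSum (pvLens pre ++ (M - 1) :: pvLens post) M
      = (pvLens pre).sum + M + (pvLens post).sum - 1 := by
    rw [pvWS_eq_sum_of_le _ M hallB]; exact hTB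
  unfold pvBCore
  rw [hLA, hLB, hTA, hTB]
  by_cases hA : (pvLens pre).sum + M + (pvLens post).sum - 1 ≤ maxw
  · -- one pop reaches the budget exactly: B's trimmed list is A's popped list, untouched
    rw [if_pos hA, if_neg (by omega)]
    have hfitsA : pvWaterSum (pvLens pre ++ M :: pvLens post) minw ≤ maxw := by
      have h1 := pvWS_le_sum (pvLens pre) minw
      have h2 := pvWS_le_sum (pvLens post) minw
      rw [hWS, if_neg (by omega)]
      omega
    rw [if_neg (by omega)]
    have hlev := pvLevel_spec maxw minw (pre ++ w :: post) (by rw [hLA]; simp)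
      (by rw [hLA]; exact hfitsA) (by rw [hLA, hTA]; omega)
    rw [hLA] at hlev
    set LA := pvLevel maxw minw (pre ++ w :: post) with hLAdef
    have hSM1 : pvWaterSum (pvLens pre ++ M :: pvLens post) (M - 1) ≤ maxw := by
      have h1 := pvWS_le_sum (pvLens post) (M - 1)
      have h2 := pvWS_eq_sum_of_le (pvLens pre) (M - 1) hP1
      rw [hWS, if_neg (by omega)]
      omega
    have hLA_eq : LA = M - 1 :=
      pvLevel_unique _ maxw LA (M - 1) hlev.1 hlev.2.1 hSM1
        (by rw [show M - 1 + 1 = M by ring, hSM]; omega)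
    rw [hLA_eq, show M - 1 + 1 = M by ring, hSM,
      show (pvLens pre).sum + M + (pvLens post).sum - maxw = 1 by omega]
    rw [pvZip_decomp',
      pvAssign_pop (M - 1) pre post w M hMdef.symm (by ring) (by omega)
        (fun u hu => by have := hlt u hu; omega) 1 (le_refl 1),
      show (1 : Int) - 1 = 0 by norm_num,
      pvAssign_nonpos (M - 1) (post.zip (pvLens post)) 0 (le_refl 0),
      show M - 1 + 1 = M by ring,
      pvZipMap_full post M (fun u hu => by have := hle u hu; omega)]
    simp [List.map_append]
  · by_cases hfit : pvWaterSum (pvLens pre ++ M :: pvLens post) minw ≤ maxw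
    · -- still over budget after the pop, trimming can continue: same water level
      have hSBm : pvWaterSum (pvLens pre ++ (M - 1) :: pvLens post) minw
          = pvWaterSum (pvLens pre ++ M :: pvLens post) minw := hSeq minw (by omega)
      rw [if_neg (by omega), if_neg (by omega), if_neg (by omega), if_neg (by omega)]
      have hlevA := pvLevel_spec maxw minw (pre ++ w :: post) (by rw [hLA]; simp)
        (by rw [hLA]; exact hfit) (by rw [hLA, hTA]; omega)
      rw [hLA] at hlevA
      have hlevB := pvLevel_spec maxw minw (pre ++ w.dropLast :: post) (by rw [hLB]; simp)
        (by rw [hLB]; omega) (by rw [hLB, hTB]; omega)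
      rw [hLB] at hlevB
      set LA := pvLevel maxw minw (pre ++ w :: post) with hLAdef
      set LB := pvLevel maxw minw (pre ++ w.dropLast :: post) with hLBdef
      have hmaxA := pvMax_spec (pvLens pre ++ M :: pvLens post) (by simp)
      have hhiA : (PySem.List.max? (pvLens pre ++ M :: pvLens post) (fun x => x)).getD 0 ≤ M :=
        hallA _ hmaxA.1
      have hLAM : LA ≤ M - 1 := by
        have := hlevA.2.2.2
        omega
      have hmaxw : 0 ≤ maxw := by
        by_contra hneg
        have h1 := hpre (by omega)
        have h2 := pvWS_nonneg (pvLens pre ++ M :: pvLens post) minw (by omega) hallA0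
        omega
      have hLA0 : 0 ≤ LA := by
        by_contra hneg
        have h1 : ∀ l ∈ pvLens pre ++ M :: pvLens post, 0 ≤ l := hallA0
        have h2 := pvWS_of_nonpos (pvLens pre ++ M :: pvLens post) (LA + 1) (by omega) h1
        have h3 : ((pvLens pre ++ M :: pvLens post).length : Int) * (LA + 1) ≤ 0 :=
          mul_nonpos_of_nonneg_of_nonpos (by positivity) (by omega)
        have := hlevA.2.1
        omega
      have hSBLA : pvWaterSum (pvLens pre ++ (M - 1) :: pvLens post) LA ≤ maxw := by
        rw [hSeq LA (by omega)]
        exact hlevA.1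
      have hSBLA1 : maxw < pvWaterSum (pvLens pre ++ (M - 1) :: pvLens post) (LA + 1) := by
        by_cases hLi : LA + 1 ≤ M - 1
        · rw [hSeq (LA + 1) hLi]
          exact hlevA.2.1
        · have hM1' : LA + 1 = M := by omega
          rw [hM1', hSBM]
          omega
      have hLL : LB = LA :=
        pvLevel_unique _ maxw LB LA hlevB.1 hlevB.2.1 hSBLA hSBLA1
      rw [hLL, pvZip_decomp', pvZip_decomp']
      by_cases hLi : LA + 1 ≤ M - 1
      · -- the pop happened strictly above the final level: r and every cap unchanged
        rw [hSeq (LA + 1) hLi, pvAssign_append, pvAssign_append]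
        congr 1
        set r' := pvRAfter LA (pvWaterSum (pvLens pre ++ M :: pvLens post) (LA + 1) - maxw)
          (pre.zip (pvLens pre)) with hr'def
        rw [pvAssign, pvAssign]
        by_cases hr' : 0 < r'
        · rw [if_pos ⟨hr', by omega⟩, if_pos ⟨hr', by omega⟩,
            pvSlice_dropLast w LA hLA0 (by omega)]
        · rw [if_neg (by omega), if_neg (by omega), min_eq_right (by omega),
            min_eq_right (by omega), pvSlice_dropLast w (LA + 1) (by omega) (by omega)]
      · -- the pop happened at the final level: r drops by one, the popped bullet is the
        -- first bullet of maximal length, exactly the one pvAssign trims first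
        have hM1' : LA + 1 = M := by omega
        have hrA : 2 ≤ pvWaterSum (pvLens pre ++ M :: pvLens post) (LA + 1) - maxw := by
          rw [hM1', hSM]
          omega
        have hrB : pvWaterSum (pvLens pre ++ (M - 1) :: pvLens post) (LA + 1) - maxw
            = pvWaterSum (pvLens pre ++ M :: pvLens post) (LA + 1) - maxw - 1 := by
          rw [hM1', hSM, hSBM]
          omega
        rw [hrB]
        set rA := pvWaterSum (pvLens pre ++ M :: pvLens post) (LA + 1) - maxw with hrAdef
        have hlowsnd : ∀ p ∈ pre.zip (pvLens pre), p.2 ≤ LA :=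
          pvZip_snd_le pre LA (fun u hu => by have := hlt u hu; omega)
        have hlow := pvAssign_low LA (pre.zip (pvLens pre)) hlowsnd
        rw [pvAssign_append, hlow.1 (rA - 1), hlow.2 (rA - 1)]
        rw [pvAssign, if_neg (by omega), min_eq_left (by omega),
          pvSlice_full w.dropLast (M - 1) hdl.symm]
        rw [pvAssign_pop LA pre post w M hMdef.symm hM1'.symm hLA0
          (fun u hu => by have := hlt u hu; omega) rA (by omega),
          pvZipMap_full pre (LA + 1) (fun u hu => by have := hlt u hu; omega)]
    · -- even the min_words floor exceeds the budget: both sides floor every bullet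
      have hminw0 : 0 ≤ minw := by
        by_contra hneg
        have hlen : (1 : Int) ≤ ((pvLens pre ++ M :: pvLens post).length : Int) := by
          have : 0 < (pvLens pre ++ M :: pvLens post).length := by simp
          omega
        have h2 := pvWS_of_nonpos (pvLens pre ++ M :: pvLens post) minw (by omega) hallA0
        have h3 : ((pvLens pre ++ M :: pvLens post).length : Int) * minw ≤ 1 * minw :=
          mul_le_mul_of_nonpos_right hlen (by omega)
        rw [one_mul] at h3
        have h4 := hpre (by omega)
        omega
      have hSBm : pvWaterSum (pvLens pre ++ (M - 1) :: pvLens post) minw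
          = pvWaterSum (pvLens pre ++ M :: pvLens post) minw := hSeq minw (by omega)
      rw [if_neg (by omega), if_pos (by omega), if_neg (by omega), if_pos (by omega),
        pvZip_decomp', pvZip_decomp']
      refine congrArg (fun x => (x, false)) ?_
      simp only [List.map_append, List.map_cons]
      congr 1
      congr 1
      rw [min_eq_right (by omega), min_eq_right (by omega)]
      congr 1
      exact pvSlice_dropLast w minw hminw0 (by omega)

-- the while loop computes pvBCore
theorem pvLoop_eq_bcore (maxw minw : Int) :
    ∀ (fuel : Nat) (ws : List (List String)) (total : Int),
    total = (pvLens ws).sum → total ≤ maxw + fuel →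
    (maxw < 0 → 0 ≤ minw ∧ ws ≠ []) →
    ((pvTrimLoop maxw minw fuel ws total).1.map (fun w => PySem.Str.join " " w),
      decide ((pvTrimLoop maxw minw fuel ws total).2 ≤ maxw)) = pvBCore maxw minw ws := by
  intro fuel
  induction fuel with
  | zero =>
    intro ws total htot hle hpre
    rw [pvTrimLoop]
    unfold pvBCore
    rw [if_pos (by omega)]
    exact congrArg (fun b => (ws.map (fun w => PySem.Str.join " " w), b)) (by simp; omega)
  | succ n ih =>
    intro ws total htot hle hpre
    rw [pvTrimLoop]
    by_cases h : total ≤ maxw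
    · rw [if_pos h]
      unfold pvBCore
      rw [if_pos (by omega)]
      simp [h]
    · rw [if_neg h]
      have hne : ws ≠ [] := by
        intro hnil
        subst hnil
        simp [pvLens] at htot
        exact (hpre (by omega)).2 rfl
      obtain ⟨hidx, hmax, hfirst⟩ := pvArgmax_spec ws hne
      have hmaxMem : ∀ u ∈ ws, u.length ≤ (ws.getD (pvArgmax ws) []).length := by
        intro u hu
        obtain ⟨j, hj, rfl⟩ := List.mem_iff_getElem.mp hu
        have := hmax j hj
        rwa [List.getD_eq_getElem ws [] hj] at this
      by_cases hbrk : (((ws.getD (pvArgmax ws) []).length : Nat) : Int) ≤ minw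
      · rw [if_pos hbrk,
          pvBCore_break maxw minw ws (by omega) (fun u hu => by have := hmaxMem u hu; omega)]
        simp [h]
      · rw [if_neg hbrk]
        have h1c : 1 ≤ (ws.getD (pvArgmax ws) []).length := by
          by_contra hc
          have hz : ∀ l ∈ pvLens ws, l = 0 := by
            intro l hl
            simp only [pvLens, List.mem_map] at hl
            obtain ⟨u, hu, rfl⟩ := hl
            have := hmaxMem u hu
            omega
          have : (pvLens ws).sum = 0 := List.sum_eq_zero hz
          have := (hpre (by omega)).1
          omega
        have hsplit : ws = ws.take (pvArgmax ws) ++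
            ws.getD (pvArgmax ws) [] :: ws.drop (pvArgmax ws + 1) := by
          conv_lhs => rw [← List.take_append_drop (pvArgmax ws) ws]
          rw [List.drop_eq_getElem_cons hidx, List.getD_eq_getElem ws [] hidx]
        have hset : ws.set (pvArgmax ws) (ws.getD (pvArgmax ws) []).dropLast =
            ws.take (pvArgmax ws) ++
              (ws.getD (pvArgmax ws) []).dropLast :: ws.drop (pvArgmax ws + 1) := by
          rw [List.set_eq_take_append_cons_drop, if_pos hidx,
            List.getD_eq_getElem ws [] hidx]
        have hpre_lt : ∀ u ∈ ws.take (pvArgmax ws),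
            u.length < (ws.getD (pvArgmax ws) []).length := by
          intro u hu
          obtain ⟨j, hj, rfl⟩ := List.mem_iff_getElem.mp hu
          rw [List.getElem_take]
          have hjlt : j < pvArgmax ws := by
            have := hj
            simp [List.length_take] at this
            omega
          have := hfirst j hjlt
          rwa [List.getD_eq_getElem ws [] (by omega)] at this
        have hpost_le : ∀ u ∈ ws.drop (pvArgmax ws + 1),
            u.length ≤ (ws.getD (pvArgmax ws) []).length := by
          intro u hu
          exact hmaxMem u (List.mem_of_mem_drop hu)
        have htot' : (pvLens (ws.take (pvArgmax ws) ++
            ws.getD (pvArgmax ws) [] :: ws.drop (pvArgmax ws + 1))).sum = total := by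
          rw [← hsplit]; omega
        have hsum : total - 1 = (pvLens (ws.set (pvArgmax ws)
            (ws.getD (pvArgmax ws) []).dropLast)).sum := by
          rw [hset, pvLens_append, pvLens_cons, List.sum_append, List.sum_cons]
          rw [pvLens_append, pvLens_cons, List.sum_append, List.sum_cons] at htot'
          have hdl : ((ws.getD (pvArgmax ws) []).dropLast.length : Int)
              = ((ws.getD (pvArgmax ws) []).length : Int) - 1 := by
            rw [List.length_dropLast]; omega
          omega
        have hpre' : maxw < 0 → 0 ≤ minw ∧
            ws.set (pvArgmax ws) (ws.getD (pvArgmax ws) []).dropLast ≠ [] := by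
          intro hm
          refine ⟨(hpre hm).1, ?_⟩
          intro hnil
          have := congrArg List.length hnil
          simp at this
          exact hne this
        rw [ih (ws.set (pvArgmax ws) (ws.getD (pvArgmax ws) []).dropLast) (total - 1)
          hsum (by omega) hpre']
        rw [hset]
        conv_rhs => rw [hsplit]
        exact pvBCore_step maxw minw (ws.take (pvArgmax ws)) (ws.drop (pvArgmax ws + 1))
          (ws.getD (pvArgmax ws) []) (fun hm => (hpre hm).1) hpre_lt hpost_le (by omega)
          (by omega)

-- ===== VERDICT (by name: the statement is the Claim_ definition above) =====
theorem trim_bullets_to_budget_py_spec : Claim_equal_trim_bullets_to_budget_py := by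
  intro bullets maxw minw _ hpre
  unfold Spec_trim_bullets_to_budget_py
  rw [pvAlt_eq_bcore]
  show trim_bullets_to_budget_py bullets maxw minw = _
  simp only [trim_bullets_to_budget_py]
  have hpre' : maxw < 0 → 0 ≤ minw ∧ bullets.map PySem.Str.split₀ ≠ [] := by
    intro hm
    refine ⟨(hpre hm).1, ?_⟩
    simp only [ne_eq, List.map_eq_nil_iff]
    exact (hpre hm).2
  by_cases h : ((bullets.map PySem.Str.split₀).map (fun w => (w.length : Int))).sum ≤ maxw
  · rw [if_pos h]
    unfold pvBCore
    rw [if_pos (show (pvLens (bullets.map PySem.Str.split₀)).sum ≤ maxw from h)]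
  · rw [if_neg h]
    exact pvLoop_eq_bcore maxw minw
      (((bullets.map PySem.Str.split₀).map (fun w => (w.length : Int))).sum - maxw).toNat
      (bullets.map PySem.Str.split₀)
      ((bullets.map PySem.Str.split₀).map (fun w => (w.length : Int))).sum
      rfl (by omega) hpre'
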